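-- pv_equiv track=rewrite | github.com/zht8506/Assess-Any-Image | infer_demo/gamma_arch.py | get_text_prompt
-- ===== SOURCE A (Python) =====
-- def get_text_prompt(img_path):
--     """
--         img_path: a batch of image path, len(img_path) = batch_size
--     """
--     text_prompt = []
--     for i in img_path:
--         if ('koniq10k' in i) or ('ChallengeDB_release') in i or ('kadid10k' in i) or ('databaserelease2' in i) or ('CSIQ' in i) or ('spaq' in i) or ('tid2013' in i):
--             text_prompt.append("natural quality image")
--         elif ('agiqa3k' in i):
--             text_prompt.append("AI-generated quality image")
--         elif ('UWIQA' in i):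
--             text_prompt.append("underwater quality image")
--         elif ('GFIQA-20k' in i):
--             text_prompt.append("face quality image")
--         elif ('aadb' in i) or ('ava' in i):
--             text_prompt.append("natural aesthetic image")
--         else:
--             raise ValueError(f"The image does not belong to five predefined tpyes, place validate the image path: {i}.")
--
--     return text_prompt
-- ===== SOURCE B (Python) =====
-- GROUPS = [
--     ("natural quality image", ("koniq10k", "ChallengeDB_release", "kadid10k",
--                                "databaserelease2", "CSIQ", "spaq", "tid2013")),
--     ("AI-generated quality image", ("agiqa3k",)),
--     ("underwater quality image", ("UWIQA",)),
--     ("face quality image", ("GFIQA-20k",)),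
--     ("natural aesthetic image", ("aadb", "ava")),
-- ]
--
-- def get_text_prompt(img_path):
--     # keyword-major multi-pass: sweep groups from lowest to highest priority,
--     # each sweep overwrites the slots of matching paths, so the last write
--     # (highest-priority matching group) wins.
--     result = [None] * len(img_path)
--     for prompt, keywords in reversed(GROUPS):
--         for kw in keywords:
--             for j, path in enumerate(img_path):
--                 if kw in path:
--                     result[j] = prompt
--     out = []
--     for j, r in enumerate(result):
--         if r is None:
--             raise ValueError(f"The image does not belong to five predefined tpyes, place validate the image path: {img_path[j]}.")
--         out.append(r)
--     return out
-- ===== Notes on version B (the rewrite author's own statement) =====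
-- stated objective: alternative
-- what changed: Loops are transposed: instead of A's path-major single pass with a first-match if/elif chain, B makes keyword-major sweeps over all paths in reverse priority order, overwriting a slot array so the highest-priority matching group's write wins, then extracts the slots.
import Mathlib
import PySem

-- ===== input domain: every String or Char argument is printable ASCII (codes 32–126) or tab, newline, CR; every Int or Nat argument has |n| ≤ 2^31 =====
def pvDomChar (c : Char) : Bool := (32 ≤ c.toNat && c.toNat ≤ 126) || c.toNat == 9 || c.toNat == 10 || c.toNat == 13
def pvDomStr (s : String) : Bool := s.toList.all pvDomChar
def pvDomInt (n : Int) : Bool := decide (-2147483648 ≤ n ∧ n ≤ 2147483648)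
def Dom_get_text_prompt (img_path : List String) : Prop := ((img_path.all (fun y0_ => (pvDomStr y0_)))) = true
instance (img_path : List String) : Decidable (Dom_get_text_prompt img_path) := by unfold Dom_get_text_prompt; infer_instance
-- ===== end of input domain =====

-- ===== PORT A =====
-- B transposes the loops (keyword-major sweeps with overwrite instead of A's
-- path-major first-match chain); return value only, Pre_ excludes paths on which A raises ValueError.
def get_text_prompt (img_path : List String) : List String :=
  match img_path with
  | [] => []
  | i :: rest =>
    if PySem.Str.isIn "koniq10k" i || (PySem.Str.isIn "ChallengeDB_release" i ||
       (PySem.Str.isIn "kadid10k" i || (PySem.Str.isIn "databaserelease2" i ||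
       (PySem.Str.isIn "CSIQ" i || (PySem.Str.isIn "spaq" i || PySem.Str.isIn "tid2013" i))))) then
      "natural quality image" :: get_text_prompt rest
    else if PySem.Str.isIn "agiqa3k" i then
      "AI-generated quality image" :: get_text_prompt rest
    else if PySem.Str.isIn "UWIQA" i then
      "underwater quality image" :: get_text_prompt rest
    else if PySem.Str.isIn "GFIQA-20k" i then
      "face quality image" :: get_text_prompt rest
    else if PySem.Str.isIn "aadb" i || PySem.Str.isIn "ava" i then
      "natural aesthetic image" :: get_text_prompt rest
    else
      []  -- raise ValueError: outside Pre_get_text_prompt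

-- ===== PORT B =====
def pvGroups : List (String × List String) :=
  [("natural quality image", ["koniq10k", "ChallengeDB_release", "kadid10k",
                              "databaserelease2", "CSIQ", "spaq", "tid2013"]),
   ("AI-generated quality image", ["agiqa3k"]),
   ("underwater quality image", ["UWIQA"]),
   ("face quality image", ["GFIQA-20k"]),
   ("natural aesthetic image", ["aadb", "ava"])]

-- one keyword sweep over all paths: overwrite the slot of every matching path
def pvSweep (kw prompt : String) (paths : List String) (res : List (Option String)) :
    List (Option String) :=
  (paths.zip res).map (fun pr => if PySem.Str.isIn kw pr.1 then some prompt else pr.2)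

def get_text_prompt_alt (img_path : List String) : List String :=
  let res := pvGroups.reverse.foldl
    (fun acc g => g.2.foldl (fun acc kw => pvSweep kw g.1 img_path acc) acc)
    (img_path.map (fun _ => none))
  -- a slot left none ⇒ Python raises ValueError there: outside Pre_get_text_prompt
  res.map (fun r => r.getD "")

-- ===== PRECONDITION & SPEC =====
-- Pre_ excludes exactly the inputs on which A raises ValueError: a path containing
-- none of the predefined keywords.
def Pre_get_text_prompt (img_path : List String) : Prop :=
  ∀ i ∈ img_path, (pvGroups.any (fun g => g.2.any (fun kw => PySem.Str.isIn kw i))) = true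
instance (img_path : List String) : Decidable (Pre_get_text_prompt img_path) := by
  unfold Pre_get_text_prompt; infer_instance

def pvWitness_get_text_prompt : List String := ["koniq10k/1.png", "my_ava_pic"]

def Spec_get_text_prompt (img_path : List String) (out : List String) : Prop := out = get_text_prompt_alt img_path
instance (img_path : List String) (out : List String) : Decidable (Spec_get_text_prompt img_path out) := by unfold Spec_get_text_prompt; infer_instance

-- ===== CLAIM (what is proved, stated in full; the proofs are below) =====
def Claim_equal_get_text_prompt : Prop := ∀ (img_path : List String), Dom_get_text_prompt img_path → Pre_get_text_prompt img_path → Spec_get_text_prompt img_path (get_text_prompt img_path)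

-- ===== LEMMAS AND PROOFS =====

-- per-path effect of one group, as a fold over its keywords
def pvStep (p : String) (r : Option String) (g : String × List String) : Option String :=
  g.2.foldl (fun r kw => if PySem.Str.isIn kw p then some g.1 else r) r

theorem pvStep_eq_if (p : String) (g : String × List String) : ∀ (r : Option String),
    pvStep p r g = if g.2.any (fun kw => PySem.Str.isIn kw p) then some g.1 else r := by
  unfold pvStep
  induction g.2 with
  | nil => intro r; simp
  | cons kw kws ih =>
    intro r
    rw [List.foldl_cons, ih, List.any_cons]
    cases hkw : PySem.Str.isIn kw p <;>
      cases hany : kws.any (fun kw => PySem.Str.isIn kw p) <;> simp_all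

theorem pvSweep_map (kw prompt : String) : ∀ (paths : List String) (f : String → Option String),
    pvSweep kw prompt paths (paths.map f)
      = paths.map (fun p => if PySem.Str.isIn kw p then some prompt else f p) := by
  intro paths f
  induction paths with
  | nil => rfl
  | cons p ps ih => simp only [pvSweep, List.map, List.zip_cons_cons] at ih ⊢; rw [ih]

theorem pvGroupSweep_map (prompt : String) (paths : List String) :
    ∀ (kws : List String) (f : String → Option String),
    kws.foldl (fun acc kw => pvSweep kw prompt paths acc) (paths.map f)
      = paths.map (fun p =>
          kws.foldl (fun r kw => if PySem.Str.isIn kw p then some prompt else r) (f p)) := by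
  intro kws
  induction kws with
  | nil => intro f; rfl
  | cons kw kws ih =>
    intro f
    simp only [List.foldl, pvSweep_map]
    exact ih _

theorem pvGroups_map (paths : List String) :
    ∀ (gs : List (String × List String)) (f : String → Option String),
    gs.foldl (fun acc g => g.2.foldl (fun acc kw => pvSweep kw g.1 paths acc) acc) (paths.map f)
      = paths.map (fun p => gs.foldl (pvStep p) (f p)) := by
  intro gs
  induction gs with
  | nil => intro f; rfl
  | cons g gs ih =>
    intro f
    simp only [List.foldl, pvGroupSweep_map]
    exact ih _

-- reverse fold with overwrite = first match in priority order
theorem pvRevFold_find (p : String) : ∀ (gs : List (String × List String)),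
    gs.reverse.foldl (pvStep p) none
      = (gs.find? (fun g => g.2.any (fun kw => PySem.Str.isIn kw p))).map Prod.fst := by
  intro gs
  induction gs with
  | nil => rfl
  | cons g gs ih =>
    rw [List.reverse_cons, List.foldl_append, List.foldl_cons, List.foldl_nil, ih,
        pvStep_eq_if, List.find?_cons]
    cases h : g.2.any (fun kw => PySem.Str.isIn kw p) <;> simp_all

-- per-path agreement with A's branch chain, given that some group matches
theorem pvCell_eq (i : String)
    (h : (pvGroups.any (fun g => g.2.any (fun kw => PySem.Str.isIn kw i))) = true) :
    (if PySem.Str.isIn "koniq10k" i || (PySem.Str.isIn "ChallengeDB_release" i ||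
        (PySem.Str.isIn "kadid10k" i || (PySem.Str.isIn "databaserelease2" i ||
        (PySem.Str.isIn "CSIQ" i || (PySem.Str.isIn "spaq" i || PySem.Str.isIn "tid2013" i))))) then
       "natural quality image"
     else if PySem.Str.isIn "agiqa3k" i then "AI-generated quality image"
     else if PySem.Str.isIn "UWIQA" i then "underwater quality image"
     else if PySem.Str.isIn "GFIQA-20k" i then "face quality image"
     else if PySem.Str.isIn "aadb" i || PySem.Str.isIn "ava" i then "natural aesthetic image"
     else "")
    = ((pvGroups.reverse.foldl (pvStep i) none).getD "") := by
  rw [pvRevFold_find]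
  simp only [pvGroups, List.find?, List.any_cons, List.any_nil, Bool.or_false] at h ⊢
  split_ifs with h1 h2 h3 h4 h5
  · simp only [h1]; rfl
  · simp only [Bool.not_eq_true] at h1; simp only [h1, h2]; rfl
  · simp only [Bool.not_eq_true] at h1 h2; simp only [h1, h2, h3]; rfl
  · simp only [Bool.not_eq_true] at h1 h2 h3; simp only [h1, h2, h3, h4]; rfl
  · simp only [Bool.not_eq_true] at h1 h2 h3 h4; simp only [h1, h2, h3, h4, h5]; rfl
  · exfalso
    simp only [Bool.not_eq_true] at h1 h2 h3 h4 h5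
    simp only [h1, h2, h3, h4, h5, Bool.false_or] at h
    exact absurd h Bool.false_ne_true

theorem alt_eq_map (img_path : List String) :
    get_text_prompt_alt img_path
      = img_path.map (fun p => (pvGroups.reverse.foldl (pvStep p) none).getD "") := by
  unfold get_text_prompt_alt
  rw [pvGroups_map, List.map_map]
  rfl

-- ===== VERDICT (by name: the statement is the Claim_ definition above) =====
theorem get_text_prompt_spec : Claim_equal_get_text_prompt := by
  intro img_path hdom hpre
  unfold Spec_get_text_prompt
  rw [alt_eq_map]
  induction img_path with
  | nil => rfl
  | cons i rest ih =>
    have hi := hpre i (List.mem_cons_self ..)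
    have hdomr : Dom_get_text_prompt rest := by
      unfold Dom_get_text_prompt at hdom ⊢; simp_all
    have hrest := ih hdomr (fun j hj => hpre j (List.mem_cons_of_mem _ hj))
    have hcl := pvCell_eq i hi
    unfold get_text_prompt
    simp only [List.map]
    split_ifs at hcl ⊢ with h1 h2 h3 h4 h5
    case _ => rw [hrest, hcl]
    case _ => rw [hrest, hcl]
    case _ => rw [hrest, hcl]
    case _ => rw [hrest, hcl]
    case _ => rw [hrest, hcl]
    case _ =>
      exfalso
      simp only [Bool.not_eq_true] at h1 h2 h3 h4 h5
      simp only [pvGroups, List.any_cons, List.any_nil, Bool.or_false] at hi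
      simp only [h1, h2, h3, h4, h5, Bool.false_or] at hi
      exact absurd hi Bool.false_ne_true
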